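-- pv_equiv track=rewrite | github.com/cldiazr/desafioGmailAPI | viewMessagesTest.py | es_archivo_peligroso
-- ===== SOURCE A (Python) =====
-- def es_archivo_peligroso(filename):
--     # 1. Normalización básica
--     nombre_limpio = filename.lower().strip()
--
--     extensiones_prohibidas = (".zip", ".exe", ".js", ".bat")
--     # 3. Verificación de extensión final
--     if nombre_limpio.endswith(extensiones_prohibidas):
--         return True
--
--     # 4. Verificación de doble extensión
--     # Dividimos el nombre por los puntos
--     partes = nombre_limpio.split('.')
--
--     if len(partes) > 2:
--         # Revisamos si alguna de las extensiones intermedias es peligrosa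
--         for parte in partes[1:-1]: # Saltamos el nombre y la extensión final
--             if f".{parte}" in extensiones_prohibidas:
--                 return True
--
--     return False
-- ===== SOURCE B (Python) =====
-- def es_archivo_peligroso(filename):
--     parts = filename.lower().strip().split('.')
--     return any(p in {"zip", "exe", "js", "bat"} for p in parts[1:])
-- ===== Notes on version B (the rewrite author's own statement) =====
-- stated objective: simpler
-- what changed: Replaces A's two differently-shaped checks (a tuple endswith test for the final extension plus a len>2-guarded loop over interior parts with a dotted-membership test) by one uniform pass: split on dots once and test every part after the base name against a bare-name set.
import Mathlib
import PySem

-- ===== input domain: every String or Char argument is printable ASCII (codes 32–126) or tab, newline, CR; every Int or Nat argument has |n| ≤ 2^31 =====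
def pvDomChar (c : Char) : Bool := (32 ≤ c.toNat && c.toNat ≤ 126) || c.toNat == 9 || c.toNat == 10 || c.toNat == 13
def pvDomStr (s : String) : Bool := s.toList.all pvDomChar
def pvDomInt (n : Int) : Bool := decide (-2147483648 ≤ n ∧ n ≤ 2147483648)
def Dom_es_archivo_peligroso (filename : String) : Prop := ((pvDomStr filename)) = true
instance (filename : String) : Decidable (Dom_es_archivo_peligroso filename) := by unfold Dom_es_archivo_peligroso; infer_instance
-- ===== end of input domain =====

-- B merges A's two differently-shaped checks (tuple endswith + guarded interior loop) into one
-- uniform membership pass over all dot-parts after the base name; same behaviour, simpler shape.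

-- ===== PORT A =====
-- the tuple of forbidden dotted extensions
def pvProhibidas : List String := [".zip", ".exe", ".js", ".bat"]

def es_archivo_peligroso (filename : String) : Bool :=
  let nombre_limpio := PySem.Str.strip (PySem.Str.lower filename)
  -- endswith with a tuple argument is the disjunction of the four suffix tests
  if PySem.Str.endswith nombre_limpio ".zip" || PySem.Str.endswith nombre_limpio ".exe" ||
     PySem.Str.endswith nombre_limpio ".js" || PySem.Str.endswith nombre_limpio ".bat" then
    true
  else
    -- split('.') with a nonempty separator never raises: getD [] is unreachable
    let partes := (PySem.Str.split? nombre_limpio ".").getD []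
    if 2 < partes.length then
      -- for-loop with early 'return True' = any; f".{parte}" prepends '.' (exact on every string)
      (PySem.List.slice partes (some 1) (some (-1))).any
        (fun parte => pvProhibidas.contains (String.ofList ('.' :: parte.toList)))
    else
      false

-- ===== PORT B =====
-- the set of forbidden bare extension names
def pvPeligrosas : List String := ["zip", "exe", "js", "bat"]

def es_archivo_peligroso_alt (filename : String) : Bool :=
  let parts := (PySem.Str.split? (PySem.Str.strip (PySem.Str.lower filename)) ".").getD []
  (PySem.List.slice parts (some 1) none).any (fun p => pvPeligrosas.contains p)

-- ===== PRECONDITION & SPEC =====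
def Spec_es_archivo_peligroso (filename : String) (out : Bool) : Prop := out = es_archivo_peligroso_alt filename
instance (filename : String) (out : Bool) : Decidable (Spec_es_archivo_peligroso filename out) := by unfold Spec_es_archivo_peligroso; infer_instance

-- ===== CLAIM (what is proved, stated in full; the proofs are below) =====
def Claim_equal_es_archivo_peligroso : Prop := ∀ (filename : String), Dom_es_archivo_peligroso filename → Spec_es_archivo_peligroso filename (es_archivo_peligroso filename)

-- ===== LEMMAS AND PROOFS =====

-- reference version of str.split('.') on char lists, in the structural shape the proofs use
def split1 : List Char → List (List Char)
  | [] => [[]]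
  | c :: r =>
    if c = '.' then [] :: split1 r
    else
      match split1 r with
      | [] => [[c]]          -- unreachable: split1 is never []
      | h :: t => (c :: h) :: t

def consH (p : List Char) : List (List Char) → List (List Char)
  | [] => [p]
  | h :: t => (p ++ h) :: t

lemma split1_ne_nil (s : List Char) : split1 s ≠ [] := by
  cases s with
  | nil => simp [split1]
  | cons c r =>
    simp only [split1]
    split
    · simp
    · split <;> simp_all

lemma go_spec (fuel : Nat) (l cur : List Char) (acc : List (List Char))
    (h : l.length < fuel) :
    PySem.Chars.splitOn.go ['.'] fuel l cur acc = acc.reverse ++ consH cur.reverse (split1 l) := by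
  induction fuel generalizing l cur acc with
  | zero => omega
  | succ f ih =>
    cases l with
    | nil =>
      rw [PySem.Chars.splitOn.go]
      · simp [consH, split1]
      · simp
    | cons c rest =>
      rw [PySem.Chars.splitOn.go]
      by_cases hc : c = '.'
      · subst hc
        simp only [List.isPrefixOf, BEq.rfl, Bool.true_and, if_true,
          List.length_cons, List.length_nil, Nat.zero_add, List.drop_succ_cons, List.drop_zero]
        rw [ih rest [] (cur.reverse :: acc) (by simpa using Nat.lt_of_succ_lt_succ h)]
        obtain ⟨h1, t1, ht⟩ : ∃ h1 t1, split1 rest = h1 :: t1 := by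
          cases hsr : split1 rest with
          | nil => exact absurd hsr (split1_ne_nil rest)
          | cons a b => exact ⟨a, b, rfl⟩
        simp [split1, consH, ht]
      · have hpre : (['.'].isPrefixOf (c :: rest)) = false := by
          simp [List.isPrefixOf]
          intro hq; exact absurd hq.symm hc
        rw [hpre]
        simp only [if_false, Bool.false_eq_true]
        rw [ih rest (c :: cur) acc (by simpa using Nat.lt_of_succ_lt_succ h)]
        obtain ⟨h1, t1, ht⟩ : ∃ h1 t1, split1 rest = h1 :: t1 := by
          cases hsr : split1 rest with
          | nil => exact absurd hsr (split1_ne_nil rest)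
          | cons a b => exact ⟨a, b, rfl⟩
        simp [split1, consH, ht, hc]

lemma splitOn_eq_split1 (s : List Char) : PySem.Chars.splitOn s ['.'] = split1 s := by
  rw [PySem.Chars.splitOn, go_spec s.length.succ s [] [] (Nat.lt_succ_self _)]
  obtain ⟨h1, t1, ht⟩ : ∃ h1 t1, split1 s = h1 :: t1 := by
    cases hsr : split1 s with
    | nil => exact absurd hsr (split1_ne_nil s)
    | cons a b => exact ⟨a, b, rfl⟩
  simp [consH, ht]

-- '.'-free strings are a single part, and conversely
lemma split1_length_one_iff (s : List Char) : (split1 s).length = 1 ↔ '.' ∉ s := by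
  induction s with
  | nil => simp [split1]
  | cons c r ih =>
    by_cases hc : c = '.'
    · subst hc
      have hlen : 0 < (split1 r).length := List.length_pos_of_ne_nil (split1_ne_nil r)
      refine iff_of_false ?_ (by simp)
      simp [split1, List.length_eq_zero_iff, split1_ne_nil]
    · cases ht : split1 r with
      | nil => exact absurd ht (split1_ne_nil r)
      | cons h1 t1 =>
        simp [split1, hc, ht, Ne.symm hc]
        rw [← ih]
        simp [ht]

lemma split1_of_no_dot (s : List Char) (h : '.' ∉ s) : split1 s = [s] := by
  induction s with
  | nil => simp [split1]
  | cons c r ih =>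
    have hc : c ≠ '.' := fun hq => h (hq ▸ List.mem_cons_self)
    have hr : '.' ∉ r := fun hq => h (List.mem_cons_of_mem _ hq)
    simp [split1, hc, ih hr]

-- ending with ".ext" (ext dot-free) is exactly: at least two parts and the last part is ext
lemma suffix_iff_last_part (s ext : List Char) (hext : '.' ∉ ext) :
    ('.' :: ext) <:+ s ↔ 2 ≤ (split1 s).length ∧ (split1 s).getLast? = some ext := by
  induction s with
  | nil => simp [split1]
  | cons c r ih =>
    rw [List.suffix_cons_iff]
    obtain ⟨h1, t1, ht⟩ : ∃ h1 t1, split1 r = h1 :: t1 := by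
      cases hsr : split1 r with
      | nil => exact absurd hsr (split1_ne_nil r)
      | cons a b => exact ⟨a, b, rfl⟩
    by_cases hc : c = '.'
    · subst hc
      by_cases hlen : 2 ≤ (split1 r).length
      · constructor
        · rintro (heq | hsuf)
          · have hr : ext = r := by injection heq
            subst hr
            have := split1_of_no_dot ext hext
            rw [this] at hlen
            simp at hlen
          · obtain ⟨hl2, hlast⟩ := ih.mp hsuf
            refine ⟨by simp [split1, ht], ?_⟩
            show (split1 ('.' :: r)).getLast? = some ext
            simpa [split1, ht, List.getLast?_cons_cons] using hlast
        · rintro ⟨-, hlast⟩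
          refine Or.inr (ih.mpr ⟨hlen, ?_⟩)
          rw [ht]
          simpa [split1, ht, List.getLast?_cons_cons] using hlast
      · have h1len : (split1 r).length = 1 := by
          have := List.length_pos_of_ne_nil (split1_ne_nil r); omega
        have hnd : '.' ∉ r := (split1_length_one_iff r).mp h1len
        have hsp : split1 r = [r] := split1_of_no_dot r hnd
        constructor
        · rintro (heq | hsuf)
          · have hr : ext = r := by injection heq
            subst hr
            simp [split1, hsp]
          · exact absurd ((ih.mp hsuf).1) (by rw [h1len]; omega)
        · rintro ⟨-, hlast⟩
          simp [split1, hsp] at hlast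
          exact Or.inl (by rw [hlast])
    · have hne : ¬ ('.' :: ext = c :: r) := by
        intro h; exact hc (by injection h with h1 _; exact h1.symm)
      cases t1 with
      | nil =>
        have h1len : (split1 r).length = 1 := by rw [ht]; rfl
        refine iff_of_false ?_ ?_
        · rintro (heq | hsuf)
          · exact hne heq
          · exact absurd ((ih.mp hsuf).1) (by rw [h1len]; omega)
        · rintro ⟨hl, -⟩
          simp [split1, hc, ht] at hl
      | cons b t2 =>
        have : ('.' :: ext <:+ r) ↔ (2 ≤ (split1 (c :: r)).length ∧ (split1 (c :: r)).getLast? = some ext) := by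
          rw [ih, ht]
          simp [split1, hc, ht, List.getLast?_cons_cons]
        rw [← this]
        constructor
        · rintro (heq | hsuf)
          · exact absurd heq hne
          · exact hsuf
        · exact Or.inr

-- the bare-name membership test, on char lists
def qB (l : List Char) : Bool :=
  l == ['z', 'i', 'p'] || (l == ['e', 'x', 'e'] || (l == ['j', 's'] || l == ['b', 'a', 't']))

lemma beq_ofList (l : List Char) (s : String) :
    (String.ofList l == s) = (l == s.toList) := by
  rw [Bool.eq_iff_iff, beq_iff_eq, beq_iff_eq]
  constructor
  · intro h; rw [← h, String.toList_ofList]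
  · intro h; rw [h, String.ofList_toList]

lemma contains_bare (l : List Char) : pvPeligrosas.contains (String.ofList l) = qB l := by
  rw [pvPeligrosas]
  rw [List.contains_cons, List.contains_cons, List.contains_cons, List.contains_cons,
    List.contains_nil, Bool.or_false]
  rw [beq_ofList, beq_ofList, beq_ofList, beq_ofList]
  simp [qB]

lemma contains_dotted (l : List Char) :
    pvProhibidas.contains (String.ofList ('.' :: l)) = qB l := by
  rw [pvProhibidas]
  rw [List.contains_cons, List.contains_cons, List.contains_cons, List.contains_cons,
    List.contains_nil, Bool.or_false]
  rw [beq_ofList, beq_ofList, beq_ofList, beq_ofList]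
  simp [qB]

lemma ends_eq (s ext : List Char) (hext : '.' ∉ ext) :
    PySem.Chars.endswith s ('.' :: ext) =
      (decide (2 ≤ (split1 s).length) && ((split1 s).getLast? == some ext)) := by
  rw [Bool.eq_iff_iff, PySem.Chars.endswith_iff, suffix_iff_last_part s ext hext]
  simp

lemma split?_dot (t : String) :
    PySem.Str.split? t "." = some ((split1 t.toList).map String.ofList) := by
  simp [PySem.Str.split?, PySem.Chars.split?, splitOn_eq_split1]

lemma slice_one_neg_one {α : Type} (xs : List α) :
    PySem.List.slice xs (some 1) (some (-1)) = xs.tail.dropLast := by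
  cases xs with
  | nil => rfl
  | cons a l => simp [PySem.List.slice, List.dropLast_eq_take]

-- the whole equivalence, at the level of the dot-parts of the normalized name
lemma core (s : List Char) :
    (if (PySem.Chars.endswith s ".zip".toList || PySem.Chars.endswith s ".exe".toList ||
         PySem.Chars.endswith s ".js".toList || PySem.Chars.endswith s ".bat".toList) then true
     else if 2 < (split1 s).length then ((split1 s).tail.dropLast).any qB else false)
    = (split1 s).tail.any qB := by
  have e1 : PySem.Chars.endswith s ".zip".toList =
      (decide (2 ≤ (split1 s).length) && ((split1 s).getLast? == some ['z', 'i', 'p'])) :=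
    ends_eq s ['z', 'i', 'p'] (by decide)
  have e2 : PySem.Chars.endswith s ".exe".toList =
      (decide (2 ≤ (split1 s).length) && ((split1 s).getLast? == some ['e', 'x', 'e'])) :=
    ends_eq s ['e', 'x', 'e'] (by decide)
  have e3 : PySem.Chars.endswith s ".js".toList =
      (decide (2 ≤ (split1 s).length) && ((split1 s).getLast? == some ['j', 's'])) :=
    ends_eq s ['j', 's'] (by decide)
  have e4 : PySem.Chars.endswith s ".bat".toList =
      (decide (2 ≤ (split1 s).length) && ((split1 s).getLast? == some ['b', 'a', 't'])) :=
    ends_eq s ['b', 'a', 't'] (by decide)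
  rw [e1, e2, e3, e4]
  obtain ⟨p0, rest, ht⟩ : ∃ p0 rest, split1 s = p0 :: rest := by
    cases hsr : split1 s with
    | nil => exact absurd hsr (split1_ne_nil s)
    | cons a b => exact ⟨a, b, rfl⟩
  rw [ht]
  cases hrest : rest with
  | nil => simp
  | cons r0 rs =>
    have hne : rest ≠ [] := by rw [hrest]; simp
    obtain ⟨ds, lastp, hds⟩ : ∃ ds lastp, rest = ds ++ [lastp] :=
      ⟨rest.dropLast, rest.getLast hne, (List.dropLast_append_getLast hne).symm⟩
    rw [← hrest, hds]
    have hlast : (p0 :: (ds ++ [lastp])).getLast? = some lastp := by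
      rw [← List.cons_append]; exact List.getLast?_concat
    rw [hlast]
    have hlen : (2 : ℕ) ≤ (p0 :: (ds ++ [lastp])).length := by simp
    rw [decide_eq_true hlen]
    simp only [Bool.true_and, List.tail_cons, List.dropLast_concat, List.any_append,
      List.any_cons, List.any_nil, Bool.or_false]
    have hq : ((some lastp == some ['z', 'i', 'p']) || (some lastp == some ['e', 'x', 'e']) ||
        (some lastp == some ['j', 's']) || (some lastp == some ['b', 'a', 't'])) = qB lastp := by
      simp [qB, Bool.or_assoc]
    rw [hq]
    by_cases hds0 : ds = []
    · subst hds0; simp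
    · have h2 : 2 < (p0 :: (ds ++ [lastp])).length := by
        have := List.length_pos_of_ne_nil hds0
        simp
        omega
      rw [if_pos h2]
      cases hqb : qB lastp <;> simp [Bool.or_comm]

theorem es_archivo_peligroso_spec : Claim_equal_es_archivo_peligroso := by
  intro filename _
  unfold Spec_es_archivo_peligroso
  simp only [es_archivo_peligroso, es_archivo_peligroso_alt]
  generalize PySem.Str.strip (PySem.Str.lower filename) = t
  rw [split?_dot t]
  simp only [Option.getD_some, List.length_map, PySem.List.slice_from_one,
    slice_one_neg_one, ← List.map_tail, ← List.map_dropLast, List.any_map]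
  simp only [Function.comp_def, String.toList_ofList, contains_dotted, contains_bare,
    PySem.Str.endswith_eq]
  exact core t.toList
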